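-- pv_equiv track=rewrite | github.com/pareronia/adventofcode | 2020/AoC2020_06.py | part_1
-- ===== SOURCE A (Python) =====
-- def _append_empty_line(lst: tuple[str]) -> list[str]:
--     new_lst = list(lst)
--     new_lst.append("")
--     return new_lst
--
-- def _sum_of_counts(lists: list[list]) -> int:
--     return sum([len(lst) for lst in lists])
--
-- def part_1(inputs: tuple[str]) -> int:
--     inputs = _append_empty_line(inputs)
--     unique_anwers_per_group = []
--     unique_answers_for_group = set()
--     for input_ in inputs:
--         if len(input_) > 0:
--             unique_answers_for_group.update(input_)
--             continue
--         unique_anwers_per_group.append(unique_answers_for_group)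
--         unique_answers_for_group = set()
--     return _sum_of_counts(unique_anwers_per_group)
-- ===== SOURCE B (Python) =====
-- def part_1(inputs: tuple[str]) -> int:
--     lines = list(inputs)
--     n = len(lines)
--     total = 0
--     i = 0
--     while i < n:
--         j = i
--         while j < n and len(lines[j]) > 0:
--             j += 1
--         cs = sorted("".join(lines[i:j]))
--         total += (1 if cs else 0) + sum(1 for x, y in zip(cs, cs[1:]) if x != y)
--         i = j + 1
--     return total
-- ===== Notes on version B (the rewrite author's own statement) =====
-- stated objective: alternative
-- what changed: B replaces A's set-accumulating flush-on-empty pass (with an appended empty-line sentinel and a list of flushed sets) by a two-pointer scan over line indices that slices out each run of non-empty lines and counts its distinct characters by sorting the concatenation and counting adjacent unequal pairs - no sets and no sentinel at all.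
import Mathlib
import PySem

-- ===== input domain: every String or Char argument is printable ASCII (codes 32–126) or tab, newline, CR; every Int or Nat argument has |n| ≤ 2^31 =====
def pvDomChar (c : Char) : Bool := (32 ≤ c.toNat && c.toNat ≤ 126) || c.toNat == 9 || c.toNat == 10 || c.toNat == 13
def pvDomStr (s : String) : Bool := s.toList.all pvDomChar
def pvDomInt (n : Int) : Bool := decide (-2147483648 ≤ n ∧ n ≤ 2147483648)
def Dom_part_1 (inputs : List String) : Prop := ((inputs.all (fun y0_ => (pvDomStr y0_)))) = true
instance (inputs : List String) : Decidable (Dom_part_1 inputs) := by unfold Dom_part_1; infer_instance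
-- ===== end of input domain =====

-- B replaces A's set-accumulating flush-on-empty loop by a two-pointer index scan over runs of
-- non-empty lines, counting each run's distinct characters by sort + adjacent-unequal count
-- (objective: alternative; no sets, no sentinel).

-- ===== PORT A =====
-- helper _append_empty_line
def appendEmptyLine (lst : List String) : List String := lst ++ [""]

-- helper _sum_of_counts: sum([len(lst) for lst in lists])
def sumOfCounts (lists : List (PySem.Set Char)) : Int :=
  (lists.map (fun lst => (PySem.Set.len lst : Int))).sum

-- one iteration of A's for-loop, state = (unique_anwers_per_group, unique_answers_for_group)
def stepA (st : List (PySem.Set Char) × PySem.Set Char) (input_ : String) :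
    List (PySem.Set Char) × PySem.Set Char :=
  if PySem.Str.len input_ > 0 then (st.1, PySem.Set.update st.2 input_.toList)
  else (st.1 ++ [st.2], PySem.Set.empty)

def part_1 (inputs : List String) : Int :=
  let inputs' := appendEmptyLine inputs
  let st := inputs'.foldl stepA ([], PySem.Set.empty)
  sumOfCounts st.1

-- ===== PORT B =====
-- inner while loop: 'while j < n and len(lines[j]) > 0: j += 1'
def innerScan (lines : List String) (n j : Nat) : Nat :=
  if j < n ∧ PySem.Str.len (PySem.List.pyGetD lines (j : Int) "") > 0 then
    innerScan lines n (j + 1)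
  else j
termination_by n - j
decreasing_by omega

theorem innerScan_ge (lines : List String) (n j : Nat) : j ≤ innerScan lines n j := by
  unfold innerScan
  split
  · exact Nat.le_trans (Nat.le_succ j) (innerScan_ge lines n (j + 1))
  · exact Nat.le_refl j
termination_by n - j
decreasing_by omega

-- outer while loop: state = (i, total)
def outerLoop (lines : List String) (n i : Nat) (total : Int) : Int :=
  if i < n then
    let j := innerScan lines n i
    let cs := PySem.List.sorted
      (PySem.Str.join "" (PySem.List.slice lines (some (i : Int)) (some (j : Int)))).toList
      (fun x => x) false
    let d : Int := (if cs = [] then 0 else 1) +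
      ((cs.zip (PySem.List.slice cs (some 1) none)).map
        (fun p => if p.1 ≠ p.2 then (1 : Int) else 0)).sum
    outerLoop lines n (j + 1) (total + d)
  else total
termination_by n + 1 - i
decreasing_by
  have := innerScan_ge lines n i; omega

def part_1_alt (inputs : List String) : Int :=
  outerLoop inputs inputs.length 0 0

-- ===== PRECONDITION & SPEC =====
def Spec_part_1 (inputs : List String) (out : Int) : Prop := out = part_1_alt inputs
instance (inputs : List String) (out : Int) : Decidable (Spec_part_1 inputs out) := by unfold Spec_part_1; infer_instance

-- ===== CLAIM (what is proved, stated in full; the proofs are below) =====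
def Claim_equal_part_1 : Prop := ∀ (inputs : List String), Dom_part_1 inputs → Spec_part_1 inputs (part_1 inputs)

-- ===== LEMMAS AND PROOFS =====

-- A's result as a recursion over the lines (flush on empty, final sentinel flush)
def flushSum : List String → PySem.Set Char → Int
  | [], cur => PySem.Set.len cur
  | s :: rest, cur =>
      if PySem.Str.len s > 0 then flushSum rest (PySem.Set.update cur s.toList)
      else (PySem.Set.len cur : Int) + flushSum rest PySem.Set.empty

theorem foldl_stepA_eq_flushSum (lines : List String) :
    ∀ (gs : List (PySem.Set Char)) (cur : PySem.Set Char),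
    sumOfCounts (((lines ++ [""]).foldl stepA (gs, cur)).1)
      = sumOfCounts gs + flushSum lines cur := by
  induction lines with
  | nil =>
      intro gs cur
      have hemp : ¬ PySem.Str.len "" > 0 := by decide
      simp only [List.nil_append, List.foldl_cons, List.foldl_nil, stepA, if_neg hemp]
      simp [sumOfCounts, flushSum]
  | cons s rest ih =>
      intro gs cur
      simp only [List.cons_append, List.foldl_cons]
      by_cases h : PySem.Str.len s > 0
      · rw [show stepA (gs, cur) s = (gs, PySem.Set.update cur s.toList) by
          unfold stepA; rw [if_pos h]]
        rw [ih]
        simp only [flushSum, if_pos h]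
      · rw [show stepA (gs, cur) s = (gs ++ [cur], PySem.Set.empty) by
          unfold stepA; rw [if_neg h]]
        rw [ih]
        simp only [flushSum, if_neg h, sumOfCounts, List.map_append, List.sum_append,
          List.map_cons, List.map_nil, List.sum_cons, List.sum_nil]
        show _ + (_ + 0) + _ = _
        ring

theorem part_1_eq_flushSum (inputs : List String) :
    part_1 inputs = flushSum inputs PySem.Set.empty := by
  show sumOfCounts (((inputs ++ [""]).foldl stepA ([], PySem.Set.empty)).1) = _
  rw [foldl_stepA_eq_flushSum]
  simp [sumOfCounts]

-- ---- distinct-count-by-sorting = set size ----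

-- B's per-group count as a function of the character list
def adjCount (cs : List Char) : Int :=
  (if cs = [] then 0 else 1) +
    ((cs.zip (PySem.List.slice cs (some 1) none)).map
      (fun p => if p.1 ≠ p.2 then (1 : Int) else 0)).sum

theorem adjCount_of_chain (cs : List Char) (h : cs.Pairwise (· ≤ ·)) :
    adjCount cs = (cs.toFinset.card : Int) := by
  induction cs with
  | nil => simp [adjCount]
  | cons a t ih =>
      match t, h with
      | [], _ => simp [adjCount, PySem.List.slice_from_one]
      | b :: u, h =>
        have hab : a ≤ b := (List.pairwise_cons.mp h).1 b (by simp)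
        have hrest : (b :: u).Pairwise (· ≤ ·) := (List.pairwise_cons.mp h).2
        have ihr := ih hrest
        simp only [adjCount, PySem.List.slice_from_one, List.tail_cons, List.zip_cons_cons,
          List.map_cons, List.sum_cons, if_neg (by simp : ¬ (a :: b :: u) = []),
          if_neg (by simp : ¬ (b :: u) = [])] at ihr ⊢
        by_cases hab' : a = b
        · subst hab'
          have hcard : (a :: a :: u).toFinset.card = (a :: u).toFinset.card := by
            simp [List.toFinset_cons]
          rw [hcard]
          simp only [ne_eq, not_true_eq_false, if_false] at ihr ⊢
          linarith [ihr]
        · have hnotmem : a ∉ (b :: u).toFinset := by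
            simp only [List.mem_toFinset, List.mem_cons]
            rintro (h1 | h2)
            · exact hab' h1
            · have hba : b ≤ a := List.rel_of_pairwise_cons hrest h2
              exact hab' (le_antisymm hab hba)
          rw [List.toFinset_cons, Finset.card_insert_of_notMem hnotmem]
          simp only [ne_eq, if_pos hab'] at ihr ⊢
          push_cast
          linarith [ihr]

theorem len_ofList_eq_card (l : List Char) :
    (PySem.Set.len (PySem.Set.ofList l) : Int) = (l.toFinset.card : Int) := by
  have hperm : (PySem.Set.ofList l).Perm l.dedup := by
    apply (List.perm_ext_iff_of_nodup (PySem.Set.nodup_ofList l) l.nodup_dedup).mpr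
    intro x
    rw [PySem.Set.mem_ofList, List.mem_dedup]
  have hlen : (PySem.Set.ofList l).length = l.dedup.length := hperm.length_eq
  simp [PySem.Set.len, hlen, ← List.card_toFinset]

theorem adjCount_sorted (l : List Char) :
    adjCount (PySem.List.sorted l (fun x => x) false)
      = (PySem.Set.len (PySem.Set.ofList l) : Int) := by
  rw [adjCount_of_chain _ (PySem.List.sorted_pairwise l (fun x => x)),
    List.toFinset_eq_of_perm _ _ (PySem.List.sorted_perm l (fun x => x) false),
    len_ofList_eq_card]

-- ---- joining a group's lines ----

theorem join_empty_flatten : ∀ (g : List (List Char)), PySem.Chars.join [] g = g.flatten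
  | [] => PySem.Chars.join_nil []
  | [p] => by simp [PySem.Chars.join_singleton]
  | p :: q :: rest => by
      rw [PySem.Chars.join_cons_cons, join_empty_flatten (q :: rest)]; simp

theorem toList_join_empty (g : List String) :
    (PySem.Str.join "" g).toList = g.flatMap String.toList := by
  rw [PySem.Str.toList_join]
  show PySem.Chars.join [] (g.map String.toList) = _
  rw [join_empty_flatten]
  simp [List.flatMap_def]

-- ---- splitting flushSum at the first empty line ----

def nonEmptyLine (s : String) : Bool := decide (PySem.Str.len s > 0)

theorem nonEmptyLine_true {s : String} (h : PySem.Str.len s > 0) : nonEmptyLine s = true := by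
  simp only [nonEmptyLine, decide_eq_true_eq]; exact h

theorem nonEmptyLine_false {s : String} (h : ¬ PySem.Str.len s > 0) : nonEmptyLine s = false := by
  simp only [nonEmptyLine, decide_eq_false_iff_not]; exact h

theorem flushSum_split (lines : List String) :
    ∀ (cur : PySem.Set Char),
    flushSum lines cur
      = (PySem.Set.len (PySem.Set.update cur
            ((lines.takeWhile nonEmptyLine).flatMap String.toList)) : Int)
        + flushSum (lines.drop ((lines.takeWhile nonEmptyLine).length + 1)) PySem.Set.empty := by
  induction lines with
  | nil => intro cur; simp [flushSum, PySem.Set.update]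
  | cons s rest ih =>
      intro cur
      by_cases h : PySem.Str.len s > 0
      · rw [flushSum, if_pos h, List.takeWhile_cons_of_pos (nonEmptyLine_true h), ih]
        simp only [List.flatMap_cons, List.length_cons]
        rw [PySem.Set.update_append, List.drop_succ_cons]
      · rw [flushSum, if_neg h, List.takeWhile_cons_of_neg (by rw [nonEmptyLine_false h]; simp)]
        simp [PySem.Set.update]

-- flushSum of the empty list from the empty set
theorem flushSum_nil_empty : flushSum [] PySem.Set.empty = 0 := by
  simp [flushSum, PySem.Set.len, PySem.Set.empty]

-- characterize innerScan as i + length of the run of non-empty lines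
theorem innerScan_eq (lines : List String) :
    ∀ i, i ≤ lines.length →
    innerScan lines lines.length i
      = i + ((lines.drop i).takeWhile nonEmptyLine).length := by
  intro i hi
  induction h : lines.length - i generalizing i with
  | zero =>
      have : i = lines.length := by omega
      subst this
      rw [innerScan]
      simp
  | succ k ih =>
      have hlt : i < lines.length := by omega
      rw [innerScan]
      have hdrop : lines.drop i = lines[i] :: lines.drop (i + 1) :=
        List.drop_eq_getElem_cons hlt
      have hget : PySem.List.pyGetD lines (i : Int) "" = lines[i] := by
        rw [PySem.List.pyGetD_natCast]
        exact List.getD_eq_getElem lines "" hlt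
      by_cases hp : PySem.Str.len lines[i] > 0
      · rw [if_pos ⟨hlt, by rw [hget]; exact hp⟩]
        rw [ih (i + 1) (by omega) (by omega), hdrop,
          List.takeWhile_cons_of_pos (nonEmptyLine_true hp)]
        simp; omega
      · rw [if_neg (by rw [hget]; intro hc; exact hp hc.2)]
        rw [hdrop, List.takeWhile_cons_of_neg (by rw [nonEmptyLine_false hp]; simp)]
        simp

-- slice lines i..j is exactly that run
theorem slice_eq_run (lines : List String) (i : Nat) :
    PySem.List.slice lines (some (i : Int))
        (some ((i + ((lines.drop i).takeWhile nonEmptyLine).length : Nat) : Int))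
      = (lines.drop i).takeWhile nonEmptyLine := by
  rw [PySem.List.slice_natCast, Nat.add_sub_cancel_left]
  exact (List.prefix_iff_eq_take.mp (List.takeWhile_prefix _)).symm

-- one unfolding of the outer while loop
theorem outerLoop_step (lines : List String) (n i : Nat) (total : Int) (h : i < n) :
    outerLoop lines n i total =
      outerLoop lines n (innerScan lines n i + 1)
        (total + adjCount (PySem.List.sorted
          (PySem.Str.join "" (PySem.List.slice lines (some (i : Int))
            (some ((innerScan lines n i : Nat) : Int)))).toList
          (fun x => x) false)) := by
  rw [outerLoop, if_pos h]
  rfl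

-- the outer loop computes total + flushSum of the remaining lines
theorem outerLoop_eq (lines : List String) :
    ∀ (k i : Nat) (total : Int), lines.length + 1 - i ≤ k →
    outerLoop lines lines.length i total = total + flushSum (lines.drop i) PySem.Set.empty := by
  intro k
  induction k with
  | zero =>
      intro i total hk
      rw [outerLoop, if_neg (by omega)]
      rw [List.drop_eq_nil_iff.mpr (by omega), flushSum_nil_empty]
      ring
  | succ k ih =>
      intro i total hk
      by_cases hlt : i < lines.length
      · rw [outerLoop_step lines lines.length i total hlt]
        have hscan := innerScan_eq lines i (by omega)
        set tw := ((lines.drop i).takeWhile nonEmptyLine) with htw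
        rw [hscan, slice_eq_run, adjCount_sorted, toList_join_empty]
        rw [ih (i + tw.length + 1) _ (by omega)]
        rw [flushSum_split (lines.drop i) PySem.Set.empty]
        rw [PySem.Set.update_empty]
        rw [show lines.drop (i + tw.length + 1) = (lines.drop i).drop (tw.length + 1) by
          rw [List.drop_drop]; ring_nf]
        ring
      · rw [outerLoop, if_neg hlt]
        rw [List.drop_eq_nil_iff.mpr (by omega), flushSum_nil_empty]
        ring

-- ===== VERDICT (by name: the statement is the Claim_ definition above) =====
theorem part_1_spec : Claim_equal_part_1 := by
  intro inputs _
  show part_1 inputs = part_1_alt inputs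
  rw [part_1_eq_flushSum]
  show _ = outerLoop inputs inputs.length 0 0
  rw [outerLoop_eq inputs (inputs.length + 1) 0 0 (by omega)]
  simp
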